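-- pv_equiv track=rewrite | github.com/Unknown807/Advent-Of-Code-2020 | Day11/main.py | model_seats
-- ===== SOURCE A (Python) =====
-- def check_seats(seats, row, col, row_len):
--     seats_to_check = ((-1, -1), (-1, 0), (-1, 1),
--                 (0, -1), (0, 1),
--                 (1, -1), (1, 0), (1, 1))
--
--     count=0
--     for nrow, ncol in seats_to_check:
--         dr = row+nrow
--         dc = col+ncol
--         while dr>=0 and dr<len(seats) and dc>=0 and dc<row_len and seats[dr][dc] == ".":
--             dr += nrow
--             dc += ncol
--
--         if dr>=0 and dr<len(seats) and dc>=0 and dc<row_len: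
--             if seats[dr][dc] == "#":
--                 count+=1
--
--     return count
--
-- def model_seats(seats):
--     new_seats = []
--     total = 0
--     for row in range(len(seats)):
--         new_row = []
--         for col in range(len(seats[row])):
--             seat = seats[row][col]
--             if seat == "L":
--                 if check_seats(seats, row, col, len(seats[row])) == 0:
--                     new_row.append("#")
--                     total+=1
--                     continue
--
--             elif seat == "#":
--                 if check_seats(seats, row, col, len(seats[row])) >= 5:
--                     new_row.append("L")
--                     continue
--                 else:
--                     total+=1
--
--             new_row.append(seat)
--
--         new_seats.append(new_row)
--
--     return (new_seats, total)
-- ===== SOURCE B (Python) =====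
-- def model_seats(seats):
--     h = len(seats)
--     counts = [[0] * len(row) for row in seats]
--     for dr, dc in ((-1, -1), (-1, 0), (-1, 1), (0, -1), (0, 1), (1, -1), (1, 0), (1, 1)):
--         # directional sweep: seen[r][c] = 1 iff the nearest non-floor in-bounds
--         # cell from (r, c) along (dr, dc) is occupied; computed in O(1) per cell
--         # by processing cells so that (r+dr, c+dc) is always already done.
--         seen = [[0] * len(row) for row in seats]
--         rows = range(h - 1, -1, -1) if dr == 1 else range(h)
--         for r in rows:
--             w = len(seats[r])
--             cols = range(w - 1, -1, -1) if dc == 1 else range(w)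
--             for c in cols:
--                 nr, nc = r + dr, c + dc
--                 if 0 <= nr < h and 0 <= nc < len(seats[nr]):
--                     x = seats[nr][nc]
--                     s = seen[nr][nc] if x == "." else (1 if x == "#" else 0)
--                 else:
--                     s = 0
--                 seen[r][c] = s
--                 counts[r][c] += s
--     new_seats = [["#" if s == "L" and n == 0 else
--                   "L" if s == "#" and n >= 5 else s
--                   for s, n in zip(row, crow)]
--                  for row, crow in zip(seats, counts)]
--     total = sum(row.count("#") for row in new_seats)
--     return (new_seats, total)
-- ===== Notes on version B (the rewrite author's own statement) =====
-- stated objective: alternative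
-- what changed: B replaces A's per-cell ray casting (a while-loop walk in 8 directions from every seat) with eight whole-grid directional dynamic-programming sweeps that propagate a 'nearest visible seat occupied' table in O(1) per cell, then applies the seating rule in a separate pass and takes the total as the number of '#' cells of the new grid; worst-case cost drops from O(h*w*(h+w)) to O(h*w), though on random grids rays are short and a timing run shows no speedup.
-- outside the precondition, e.g. on model_seats([['.', '.'], ['L']]): A returns ([['.', '.'], ['#']], 1), B returns ([['.', '.'], ['#']], 1)
import Mathlib
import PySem

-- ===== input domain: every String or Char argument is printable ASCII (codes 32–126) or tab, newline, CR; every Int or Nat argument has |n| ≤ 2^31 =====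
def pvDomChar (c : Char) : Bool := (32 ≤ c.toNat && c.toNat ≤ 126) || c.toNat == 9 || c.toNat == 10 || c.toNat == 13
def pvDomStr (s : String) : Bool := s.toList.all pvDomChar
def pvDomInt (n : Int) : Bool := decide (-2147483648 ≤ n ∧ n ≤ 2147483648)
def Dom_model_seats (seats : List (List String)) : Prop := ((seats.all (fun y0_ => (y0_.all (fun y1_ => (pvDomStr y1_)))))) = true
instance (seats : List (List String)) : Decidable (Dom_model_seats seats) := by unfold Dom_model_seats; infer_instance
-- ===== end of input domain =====

-- B replaces A's per-cell 8-direction ray casting by eight whole-grid directional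
-- dynamic-programming sweeps (a propagated 'nearest visible seat occupied' table),
-- then a separate rule pass; objective: alternative algorithm.

-- ===== PORT A =====
-- the line-of-sight walk (A's inner `while` loop); fuel bounds the walk, which moves
-- one cell per step inside the box, so seats.length + rowLen.toNat + 2 never runs out
def pvRayWalk (seats : List (List String)) (rowLen : Int) (nrow ncol : Int) :
    Int → Int → Nat → Int × Int
  | dr, dc, 0 => (dr, dc)
  | dr, dc, fuel+1 =>
    if 0 ≤ dr ∧ dr < (seats.length : Int) ∧ 0 ≤ dc ∧ dc < rowLen ∧
        ((seats.getD dr.toNat []).getD dc.toNat "") = "." then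
      pvRayWalk seats rowLen nrow ncol (dr + nrow) (dc + ncol) fuel
    else (dr, dc)

def check_seats (seats : List (List String)) (row col rowLen : Int) : Int :=
  [((-1 : Int), (-1 : Int)), (-1, 0), (-1, 1), (0, -1), (0, 1), (1, -1), (1, 0), (1, 1)].foldl
    (fun count d =>
      let p := pvRayWalk seats rowLen d.1 d.2 (row + d.1) (col + d.2)
                 (seats.length + rowLen.toNat + 2)
      if 0 ≤ p.1 ∧ p.1 < (seats.length : Int) ∧ 0 ≤ p.2 ∧ p.2 < rowLen then
        if ((seats.getD p.1.toNat []).getD p.2.toNat "") = "#" then count + 1 else count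
      else count) 0

def model_seats (seats : List (List String)) : List (List String) × Int :=
  (List.range seats.length).foldl
    (fun (st : List (List String) × Int) row =>
      let rowL := seats.getD row []
      let inner := (List.range rowL.length).foldl
        (fun (st2 : List String × Int) col =>
          let seat := rowL.getD col ""
          if seat = "L" then
            if check_seats seats (row : Int) (col : Int) (rowL.length : Int) = 0 then
              (st2.1 ++ ["#"], st2.2 + 1)
            else (st2.1 ++ [seat], st2.2)
          else if seat = "#" then
            if 5 ≤ check_seats seats (row : Int) (col : Int) (rowL.length : Int) then
              (st2.1 ++ ["L"], st2.2)
            else (st2.1 ++ [seat], st2.2 + 1)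
          else (st2.1 ++ [seat], st2.2)) ([], st.2)
      (st.1 ++ [inner.1], inner.2)) ([], 0)

-- ===== PORT B =====
-- 2-D read/write helpers for the list-of-lists tables (Python's m[r][c] and m[r][c] = v)
def pvMget (m : List (List Int)) (r c : Nat) : Int := (m.getD r []).getD c 0
def pvMset (m : List (List Int)) (r c : Nat) (v : Int) : List (List Int) :=
  m.set r ((m.getD r []).set c v)

-- body of B's innermost loop: state = (seen, counts)
def pvSweepCell (seats : List (List String)) (d : Int × Int) (r : Nat)
    (st : List (List Int) × List (List Int)) (c : Nat) :
    List (List Int) × List (List Int) :=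
  let nr : Int := (r : Int) + d.1
  let nc : Int := (c : Int) + d.2
  let s : Int :=
    if 0 ≤ nr ∧ nr < (seats.length : Int) ∧ 0 ≤ nc ∧
        nc < (((seats.getD nr.toNat []).length : Int)) then
      let x := (seats.getD nr.toNat []).getD nc.toNat ""
      if x = "." then pvMget st.1 nr.toNat nc.toNat
      else if x = "#" then 1 else 0
    else 0
  (pvMset st.1 r c s, pvMset st.2 r c (pvMget st.2 r c + s))

-- B's per-row loop: columns descending when d.2 = 1, else ascending
def pvSweepRow (seats : List (List String)) (d : Int × Int)
    (st : List (List Int) × List (List Int)) (r : Nat) :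
    List (List Int) × List (List Int) :=
  let w := (seats.getD r []).length
  let cols := if d.2 = 1 then (List.range w).reverse else List.range w
  cols.foldl (pvSweepCell seats d r) st

-- B's per-direction pass: fresh `seen` table, rows descending when d.1 = 1
def pvSweepDir (seats : List (List String)) (counts : List (List Int))
    (d : Int × Int) : List (List Int) :=
  let rows := if d.1 = 1 then (List.range seats.length).reverse
              else List.range seats.length
  (rows.foldl (pvSweepRow seats d)
    (seats.map (fun row => List.replicate row.length (0 : Int)), counts)).2

def model_seats_alt (seats : List (List String)) : List (List String) × Int :=
  let counts :=
    [((-1 : Int), (-1 : Int)), (-1, 0), (-1, 1), (0, -1), (0, 1), (1, -1), (1, 0), (1, 1)].foldl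
      (pvSweepDir seats) (seats.map (fun row => List.replicate row.length (0 : Int)))
  let newSeats := (seats.zip counts).map (fun rc =>
    (rc.1.zip rc.2).map (fun sn =>
      if sn.1 = "L" ∧ sn.2 = 0 then "#"
      else if sn.1 = "#" ∧ 5 ≤ sn.2 then "L"
      else sn.1))
  let total := (newSeats.map (fun row => (row.count "#" : Int))).sum
  (newSeats, total)

-- ===== PRECONDITION & SPEC =====
-- Pre_ excludes ragged grids that contain a seat cell ("L"/"#"): there A's line-of-sight
-- rays, bounded by the origin row's width, can index past a shorter row and raise
-- IndexError; on the ragged seat-bearing grids where A happens to return, B returns the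
-- same value, but the crashing inputs cannot be separated in closed form.
def Pre_model_seats (seats : List (List String)) : Prop :=
  (∀ row ∈ seats, row.length = (seats.headD []).length) ∨
  (∀ row ∈ seats, ∀ s ∈ row, s ≠ "L" ∧ s ≠ "#")
instance (seats : List (List String)) : Decidable (Pre_model_seats seats) := by
  unfold Pre_model_seats; infer_instance
def pvWitness_model_seats : List (List String) :=
  [["L", ".", "#"], [".", "#", "L"]]

def Spec_model_seats (seats : List (List String)) (out : List (List String) × Int) : Prop := out = model_seats_alt seats
instance (seats : List (List String)) (out : List (List String) × Int) : Decidable (Spec_model_seats seats out) := by unfold Spec_model_seats; infer_instance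

-- ===== CLAIM (what is proved, stated in full; the proofs are below) =====
def Claim_equal_model_seats : Prop := ∀ (seats : List (List String)), Dom_model_seats seats → Pre_model_seats seats → Spec_model_seats seats (model_seats seats)

-- ===== LEMMAS AND PROOFS =====

-- ---------- A-side characterisation (per-cell rule applied to check_seats) ----------
def pvRule (s : String) (n : Int) : String :=
  if s = "L" ∧ n = 0 then "#"
  else if s = "#" ∧ 5 ≤ n then "L"
  else s
def pvStepCell (seats : List (List String)) (r : Nat) (rowL : List String) (c : Nat) : String :=
  pvRule (rowL.getD c "") (check_seats seats r c (rowL.length : Int))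
def pvInd (x : String) : Int := if x = "#" then 1 else 0
def pvRowOut (seats : List (List String)) (r : Nat) : List String :=
  (List.range (seats.getD r []).length).map (fun c => pvStepCell seats r (seats.getD r []) c)
def pvCnt (seats : List (List String)) (r : Nat) : Int := ((pvRowOut seats r).count "#" : Int)

theorem pv_count_eq_sum_ind (l : List String) : (l.map pvInd).sum = (l.count "#" : Int) := by
  induction l with
  | nil => simp
  | cons x xs ih =>
    simp [List.count_cons, pvInd, ih]
    by_cases h : x = "#" <;> simp [h] <;> ring

theorem pv_foldl_build {α : Type} (f : Nat → α) (h : Nat → Int) :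
    ∀ (n : Nat) (pre : List α) (t : Int),
    (List.range n).foldl (fun (st : List α × Int) c => (st.1 ++ [f c], st.2 + h c)) (pre, t)
      = (pre ++ (List.range n).map f, t + ((List.range n).map h).sum) := by
  intro n
  induction n with
  | zero => intro pre t; simp
  | succ n ih =>
    intro pre t
    simp [List.range_succ, List.foldl_append, ih, List.map_append, List.sum_append]
    ring

theorem pv_bodyA_eq (seats : List (List String)) (r : Nat) (rowL : List String) :
    (fun (st2 : List String × Int) col =>
          let seat := rowL.getD col ""
          if seat = "L" then
            if check_seats seats (r : Int) (col : Int) (rowL.length : Int) = 0 then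
              (st2.1 ++ ["#"], st2.2 + 1)
            else (st2.1 ++ [seat], st2.2)
          else if seat = "#" then
            if 5 ≤ check_seats seats (r : Int) (col : Int) (rowL.length : Int) then
              (st2.1 ++ ["L"], st2.2)
            else (st2.1 ++ [seat], st2.2 + 1)
          else (st2.1 ++ [seat], st2.2))
    = fun (st2 : List String × Int) c =>
        (st2.1 ++ [pvStepCell seats r rowL c], st2.2 + pvInd (pvStepCell seats r rowL c)) := by
  funext st2 c
  simp only [pvStepCell, pvRule, pvInd]
  split_ifs <;> simp_all

theorem pv_inner_eq (seats : List (List String)) (r : Nat) (t : Int) :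
    (List.range (seats.getD r []).length).foldl
        (fun (st2 : List String × Int) col =>
          let seat := (seats.getD r []).getD col ""
          if seat = "L" then
            if check_seats seats (r : Int) (col : Int) ((seats.getD r []).length : Int) = 0 then
              (st2.1 ++ ["#"], st2.2 + 1)
            else (st2.1 ++ [seat], st2.2)
          else if seat = "#" then
            if 5 ≤ check_seats seats (r : Int) (col : Int) ((seats.getD r []).length : Int) then
              (st2.1 ++ ["L"], st2.2)
            else (st2.1 ++ [seat], st2.2 + 1)
          else (st2.1 ++ [seat], st2.2)) ([], t)
    = (pvRowOut seats r, t + pvCnt seats r) := by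
  rw [pv_bodyA_eq seats r (seats.getD r [])]
  rw [pv_foldl_build (fun c => pvStepCell seats r (seats.getD r []) c)
        (fun c => pvInd (pvStepCell seats r (seats.getD r []) c))]
  simp [pvRowOut, pvCnt, ← pv_count_eq_sum_ind, List.map_map, Function.comp_def]

theorem pv_A_eq (seats : List (List String)) :
    model_seats seats
      = ((List.range seats.length).map (pvRowOut seats),
         ((List.range seats.length).map (pvCnt seats)).sum) := by
  unfold model_seats
  have hb : (fun (st : List (List String) × Int) row =>
      let rowL := seats.getD row []
      let inner := (List.range rowL.length).foldl
        (fun (st2 : List String × Int) col =>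
          let seat := rowL.getD col ""
          if seat = "L" then
            if check_seats seats (row : Int) (col : Int) (rowL.length : Int) = 0 then
              (st2.1 ++ ["#"], st2.2 + 1)
            else (st2.1 ++ [seat], st2.2)
          else if seat = "#" then
            if 5 ≤ check_seats seats (row : Int) (col : Int) (rowL.length : Int) then
              (st2.1 ++ ["L"], st2.2)
            else (st2.1 ++ [seat], st2.2 + 1)
          else (st2.1 ++ [seat], st2.2)) ([], st.2)
      (st.1 ++ [inner.1], inner.2))
      = fun (st : List (List String) × Int) r =>
          (st.1 ++ [pvRowOut seats r], st.2 + pvCnt seats r) := by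
    funext st r
    simp only []
    rw [pv_inner_eq seats r st.2]
  rw [hb, pv_foldl_build (pvRowOut seats) (pvCnt seats)]
  simp

-- ---------- the ray bit and check_seats as a sum over the 8 directions ----------
def pvDirs : List (Int × Int) :=
  [((-1 : Int), (-1 : Int)), (-1, 0), (-1, 1), (0, -1), (0, 1), (1, -1), (1, 0), (1, 1)]

def rayBit (seats : List (List String)) (w dr dc r c : Int) : Int :=
  let p := pvRayWalk seats w dr dc (r + dr) (c + dc) (seats.length + w.toNat + 2)
  if (0 ≤ p.1 ∧ p.1 < (seats.length : Int) ∧ 0 ≤ p.2 ∧ p.2 < w) ∧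
      ((seats.getD p.1.toNat []).getD p.2.toNat "") = "#" then 1 else 0

theorem pv_check_body (seats : List (List String)) (w r c count : Int) (d : Int × Int) :
    (if 0 ≤ (pvRayWalk seats w d.1 d.2 (r + d.1) (c + d.2) (seats.length + w.toNat + 2)).1 ∧
        (pvRayWalk seats w d.1 d.2 (r + d.1) (c + d.2) (seats.length + w.toNat + 2)).1 < (seats.length : Int) ∧
        0 ≤ (pvRayWalk seats w d.1 d.2 (r + d.1) (c + d.2) (seats.length + w.toNat + 2)).2 ∧
        (pvRayWalk seats w d.1 d.2 (r + d.1) (c + d.2) (seats.length + w.toNat + 2)).2 < w then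
       if ((seats.getD (pvRayWalk seats w d.1 d.2 (r + d.1) (c + d.2) (seats.length + w.toNat + 2)).1.toNat []).getD
           (pvRayWalk seats w d.1 d.2 (r + d.1) (c + d.2) (seats.length + w.toNat + 2)).2.toNat "") = "#" then count + 1 else count
     else count) = count + rayBit seats w d.1 d.2 r c := by
  simp only [rayBit]
  split_ifs <;> first | omega | (exfalso; tauto)

theorem check_eq_sum (seats : List (List String)) (r c w : Int) :
    check_seats seats r c w = (pvDirs.map (fun d => rayBit seats w d.1 d.2 r c)).sum := by
  simp only [check_seats, pvDirs, List.foldl_cons, List.foldl_nil, List.map_cons,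
    List.map_nil, List.sum_cons, List.sum_nil, pv_check_body]
  omega

-- ---------- fuel irrelevance of the walk and the local recurrence of rayBit ----------
def pvDirOK (d : Int × Int) : Prop :=
  d.1 = 1 ∨ d.1 = -1 ∨ (d.1 = 0 ∧ (d.2 = 1 ∨ d.2 = -1))

def pvMu (h w dr dc : Int) (p : Int × Int) : Nat :=
  if dr = 1 then (h - p.1).toNat + 1
  else if dr = -1 then (p.1 + 1).toNat + 1
  else if dc = 1 then (w - p.2).toNat + 1
  else (p.2 + 1).toNat + 1

theorem pvMu_dec (h w dr dc : Int) (hd : pvDirOK (dr, dc)) (p : Int × Int)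
    (hin : 0 ≤ p.1 ∧ p.1 < h ∧ 0 ≤ p.2 ∧ p.2 < w) :
    pvMu h w dr dc (p.1 + dr, p.2 + dc) < pvMu h w dr dc p := by
  simp only [pvDirOK] at hd
  unfold pvMu
  rcases hd with h1 | h1 | ⟨h1, h2 | h2⟩ <;> simp_all <;> omega

theorem pvMu_pos (h w dr dc : Int) (p : Int × Int) : 1 ≤ pvMu h w dr dc p := by
  unfold pvMu; split_ifs <;> omega

theorem pvRayWalk_succ (seats : List (List String)) (w nrow ncol dr dc : Int) (f : Nat) :
    pvRayWalk seats w nrow ncol dr dc (f + 1) =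
      if 0 ≤ dr ∧ dr < (seats.length : Int) ∧ 0 ≤ dc ∧ dc < w ∧
          ((seats.getD dr.toNat []).getD dc.toNat "") = "." then
        pvRayWalk seats w nrow ncol (dr + nrow) (dc + ncol) f
      else (dr, dc) := rfl

theorem pvRayWalk_fuel (seats : List (List String)) (w dr dc : Int)
    (hd : pvDirOK (dr, dc)) :
    ∀ (k : Nat) (p : Int × Int) (f₁ f₂ : Nat),
      pvMu (seats.length : Int) w dr dc p ≤ k →
      pvMu (seats.length : Int) w dr dc p ≤ f₁ →
      pvMu (seats.length : Int) w dr dc p ≤ f₂ →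
      pvRayWalk seats w dr dc p.1 p.2 f₁ = pvRayWalk seats w dr dc p.1 p.2 f₂ := by
  intro k
  induction k with
  | zero => intro p f₁ f₂ hk _ _; have := pvMu_pos (seats.length : Int) w dr dc p; omega
  | succ k ih =>
    intro p f₁ f₂ hk h1 h2
    obtain ⟨a, rfl⟩ : ∃ a, f₁ = a + 1 := ⟨f₁ - 1, by have := pvMu_pos (seats.length : Int) w dr dc p; omega⟩
    obtain ⟨b, rfl⟩ : ∃ b, f₂ = b + 1 := ⟨f₂ - 1, by have := pvMu_pos (seats.length : Int) w dr dc p; omega⟩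
    rw [pvRayWalk_succ, pvRayWalk_succ]
    by_cases hC : 0 ≤ p.1 ∧ p.1 < (seats.length : Int) ∧ 0 ≤ p.2 ∧ p.2 < w ∧
        ((seats.getD p.1.toNat []).getD p.2.toNat "") = "."
    · rw [if_pos hC, if_pos hC]
      have hdec := pvMu_dec (seats.length : Int) w dr dc hd p ⟨hC.1, hC.2.1, hC.2.2.1, hC.2.2.2.1⟩
      exact ih (p.1 + dr, p.2 + dc) a b (by omega) (by omega) (by omega)
    · rw [if_neg hC, if_neg hC]

theorem pvMu_start_le (seats : List (List String)) (w dr dc r c : Int)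
    (hd : pvDirOK (dr, dc)) (hw : 0 ≤ w)
    (hr : 0 ≤ r) (hr2 : r < (seats.length : Int)) (hc : 0 ≤ c) (hc2 : c < w) :
    pvMu (seats.length : Int) w dr dc (r + dr, c + dc) ≤ seats.length + w.toNat + 1 := by
  simp only [pvDirOK] at hd
  unfold pvMu
  rcases hd with h1 | h1 | ⟨h1, h2 | h2⟩ <;> simp_all <;> omega

theorem rayBit_rec (seats : List (List String)) (w dr dc r c : Int)
    (hd : pvDirOK (dr, dc)) (hw : 0 ≤ w)
    (hr : 0 ≤ r) (hr2 : r < (seats.length : Int)) (hc : 0 ≤ c) (hc2 : c < w) :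
    rayBit seats w dr dc r c =
      if 0 ≤ r + dr ∧ r + dr < (seats.length : Int) ∧ 0 ≤ c + dc ∧ c + dc < w then
        if ((seats.getD (r + dr).toNat []).getD (c + dc).toNat "") = "." then
          rayBit seats w dr dc (r + dr) (c + dc)
        else if ((seats.getD (r + dr).toNat []).getD (c + dc).toNat "") = "#" then 1 else 0
      else 0 := by
  have hF : seats.length + w.toNat + 2 = (seats.length + w.toNat + 1) + 1 := rfl
  by_cases hbox : 0 ≤ r + dr ∧ r + dr < (seats.length : Int) ∧ 0 ≤ c + dc ∧ c + dc < w
  · by_cases hdot : ((seats.getD (r + dr).toNat []).getD (c + dc).toNat "") = "."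
    · -- the walk takes one step; then fuel irrelevance aligns the two walks
      rw [if_pos hbox, if_pos hdot]
      have hw1 : pvRayWalk seats w dr dc (r + dr) (c + dc) (seats.length + w.toNat + 2)
          = pvRayWalk seats w dr dc (r + dr + dr) (c + dc + dc) (seats.length + w.toNat + 1) := by
        rw [hF, pvRayWalk_succ, if_pos ⟨hbox.1, hbox.2.1, hbox.2.2.1, hbox.2.2.2, hdot⟩]
      have hmu := pvMu_start_le seats w dr dc (r + dr) (c + dc) hd hw
        hbox.1 hbox.2.1 hbox.2.2.1 hbox.2.2.2
      have hw2 : pvRayWalk seats w dr dc (r + dr + dr) (c + dc + dc) (seats.length + w.toNat + 1)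
          = pvRayWalk seats w dr dc (r + dr + dr) (c + dc + dc) (seats.length + w.toNat + 2) :=
        pvRayWalk_fuel seats w dr dc hd (seats.length + w.toNat + 2)
          (r + dr + dr, c + dc + dc) _ _ (by omega) (by omega) (by omega)
      simp only [rayBit, hw1, hw2]
    · -- the walk stops at the neighbour, which is a non-floor in-box cell
      rw [if_pos hbox, if_neg hdot]
      have hstop : pvRayWalk seats w dr dc (r + dr) (c + dc) (seats.length + w.toNat + 2)
          = (r + dr, c + dc) := by
        rw [hF, pvRayWalk_succ, if_neg (by intro h; exact hdot h.2.2.2.2)]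
      simp only [rayBit, hstop]
      by_cases hh : ((seats.getD (r + dr).toNat []).getD (c + dc).toNat "") = "#"
      · simp [hh, hbox.1, hbox.2.1, hbox.2.2.1, hbox.2.2.2]
      · simp only [List.getD_eq_getElem?_getD] at hh
        simp [hh]
  · -- the walk stops immediately outside the box
    rw [if_neg hbox]
    have hstop : pvRayWalk seats w dr dc (r + dr) (c + dc) (seats.length + w.toNat + 2)
        = (r + dr, c + dc) := by
      rw [hF, pvRayWalk_succ, if_neg (by intro h; exact hbox ⟨h.1, h.2.1, h.2.2.1, h.2.2.2.1⟩)]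
    simp only [rayBit, hstop]
    rw [if_neg (fun h => hbox ⟨h.1.1, h.1.2.1, h.1.2.2.1, h.1.2.2.2⟩)]

-- ---------- shape bookkeeping for the tables ----------
def pvShape (seats : List (List String)) (m : List (List Int)) : Prop :=
  m.map List.length = seats.map List.length

theorem pvShape_len {seats : List (List String)} {m : List (List Int)}
    (h : pvShape seats m) : m.length = seats.length := by
  have := congrArg List.length h
  simpa using this

theorem pv_len_getD {α : Type} (m : List (List α)) (r : Nat) :
    (m.map List.length).getD r 0 = (m.getD r []).length := by
  by_cases hr : r < m.length
  · rw [List.getD_eq_getElem (m.map List.length) 0 (by simpa using hr),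
      List.getD_eq_getElem m [] hr, List.getElem_map]
  · rw [List.getD_eq_default (m.map List.length) 0 (by simpa using hr),
      List.getD_eq_default m [] (by omega)]
    rfl

theorem pvShape_row {seats : List (List String)} {m : List (List Int)}
    (h : pvShape seats m) (r : Nat) : (m.getD r []).length = (seats.getD r []).length := by
  rw [← pv_len_getD, ← pv_len_getD, h]

theorem pvMset_shape (seats : List (List String)) (m : List (List Int)) (r c : Nat) (v : Int)
    (h : pvShape seats m) : pvShape seats (pvMset m r c v) := by
  unfold pvShape pvMset
  rw [List.map_set, List.length_set]
  by_cases hr : r < m.length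
  · rw [List.getD_eq_getElem m [] hr]
    have : (m.map List.length).set r m[r].length = m.map List.length := by
      have h2 : r < (m.map List.length).length := by simpa using hr
      have := List.set_getElem_self (as := m.map List.length) h2
      simpa using this
    rw [this, h]
  · rw [List.set_eq_of_length_le (by simpa using Nat.le_of_not_lt hr), h]

theorem pvMget_mset_self (m : List (List Int)) (r c : Nat) (v : Int)
    (hr : r < m.length) (hc : c < (m.getD r []).length) :
    pvMget (pvMset m r c v) r c = v := by
  unfold pvMget pvMset
  have h1 : (m.set r ((m.getD r []).set c v)).getD r [] = (m.getD r []).set c v := by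
    rw [List.getD_eq_getElem _ [] (by simpa using hr), List.getElem_set_self]
  rw [h1, List.getD_eq_getElem _ 0 (by simpa using hc), List.getElem_set_self]

theorem pvMget_mset_ne (m : List (List Int)) (r c r' c' : Nat) (v : Int)
    (h : r ≠ r' ∨ c ≠ c') :
    pvMget (pvMset m r c v) r' c' = pvMget m r' c' := by
  unfold pvMget pvMset
  by_cases hrr : r = r'
  · subst hrr
    have hcc : c ≠ c' := by tauto
    by_cases hr : r < m.length
    · have h1 : (m.set r ((m.getD r []).set c v)).getD r [] = (m.getD r []).set c v := by
        rw [List.getD_eq_getElem _ [] (by simpa using hr), List.getElem_set_self]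
      rw [h1]
      have h2 : ((m.getD r []).set c v).getD c' 0 = (m.getD r []).getD c' 0 := by
        simp [List.getD_eq_getElem?_getD, List.getElem?_set_ne hcc]
      rw [h2]
    · rw [List.set_eq_of_length_le (Nat.le_of_not_lt hr)]
  · have h1 : (m.set r ((m.getD r []).set c v)).getD r' [] = m.getD r' [] := by
      rw [List.getD_eq_getElem?_getD, List.getElem?_set_ne hrr, ← List.getD_eq_getElem?_getD]
    rw [h1]

-- ---------- the sweep invariant ----------
-- In everything below: H = seats.length, W = the common row width of a rectangular grid,
-- gbit d r c = rayBit at cell (r,c), D = the set of already-processed cells.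
def pvInv (seats : List (List String)) (W : Nat) (d : Int × Int)
    (base : Nat → Nat → Int) (D : Nat → Nat → Prop)
    (st : List (List Int) × List (List Int)) : Prop :=
  pvShape seats st.1 ∧ pvShape seats st.2 ∧
  (∀ r < seats.length, ∀ c < W, D r c →
      pvMget st.1 r c = rayBit seats (W : Int) d.1 d.2 (r : Int) (c : Int)) ∧
  (∀ r < seats.length, ∀ c < W, ¬ D r c → pvMget st.1 r c = 0) ∧
  (∀ r < seats.length, ∀ c < W, D r c →
      pvMget st.2 r c = base r c + rayBit seats (W : Int) d.1 d.2 (r : Int) (c : Int)) ∧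
  (∀ r < seats.length, ∀ c < W, ¬ D r c → pvMget st.2 r c = base r c)

theorem pvInv_congr (seats : List (List String)) (W : Nat) (d : Int × Int)
    (base : Nat → Nat → Int) (D D' : Nat → Nat → Prop)
    (hDD : ∀ a b, a < seats.length → b < W → (D a b ↔ D' a b))
    (st : List (List Int) × List (List Int)) (h : pvInv seats W d base D st) :
    pvInv seats W d base D' st := by
  obtain ⟨h1, h2, h3, h4, h5, h6⟩ := h
  exact ⟨h1, h2,
    fun r hr c hc hD => h3 r hr c hc ((hDD r c hr hc).mpr hD),
    fun r hr c hc hD => h4 r hr c hc (fun hx => hD ((hDD r c hr hc).mp hx)),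
    fun r hr c hc hD => h5 r hr c hc ((hDD r c hr hc).mpr hD),
    fun r hr c hc hD => h6 r hr c hc (fun hx => hD ((hDD r c hr hc).mp hx))⟩

-- rectangularity
def pvRect (seats : List (List String)) (W : Nat) : Prop :=
  ∀ row ∈ seats, row.length = W

theorem pvRect_row {seats : List (List String)} {W : Nat} (h : pvRect seats W)
    {r : Nat} (hr : r < seats.length) : (seats.getD r []).length = W := by
  rw [List.getD_eq_getElem seats [] hr]
  exact h _ (List.getElem_mem hr)

-- one cell step
set_option maxHeartbeats 1000000 in
theorem pvStep_inv (seats : List (List String)) (W : Nat) (d : Int × Int)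
    (hd : pvDirOK d) (hrect : pvRect seats W)
    (base : Nat → Nat → Int) (D : Nat → Nat → Prop)
    (r c : Nat) (hr : r < seats.length) (hc : c < W)
    (hnD : ¬ D r c)
    (hready : ∀ (hin : 0 ≤ (r : Int) + d.1 ∧ (r : Int) + d.1 < (seats.length : Int) ∧
        0 ≤ (c : Int) + d.2 ∧ (c : Int) + d.2 < (W : Int)),
        ((seats.getD ((r : Int) + d.1).toNat []).getD ((c : Int) + d.2).toNat "") = "." →
        D ((r : Int) + d.1).toNat ((c : Int) + d.2).toNat)
    (st : List (List Int) × List (List Int)) (h : pvInv seats W d base D st) :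
    pvInv seats W d base (fun a b => D a b ∨ (a = r ∧ b = c)) (pvSweepCell seats d r st c) := by
  obtain ⟨hs1, hs2, hSeenD, hSeen0, hCntD, hCnt0⟩ := h
  have hdOK : pvDirOK (d.1, d.2) := hd
  have hWnn : (0 : Int) ≤ (W : Int) := by positivity
  have hrI : (0 : Int) ≤ (r : Int) := by positivity
  have hrI2 : (r : Int) < (seats.length : Int) := by exact_mod_cast hr
  have hcI : (0 : Int) ≤ (c : Int) := by positivity
  have hcI2 : (c : Int) < (W : Int) := by exact_mod_cast hc
  have hrec := rayBit_rec seats (W : Int) d.1 d.2 (r : Int) (c : Int) hdOK hWnn hrI hrI2 hcI hcI2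
  -- the condition of the port uses the target row's width; under rectangularity it is W
  have hcond : (0 ≤ (r : Int) + d.1 ∧ (r : Int) + d.1 < (seats.length : Int) ∧
        0 ≤ (c : Int) + d.2 ∧ (c : Int) + d.2 < ((seats.getD ((r : Int) + d.1).toNat []).length : Int))
      ↔ (0 ≤ (r : Int) + d.1 ∧ (r : Int) + d.1 < (seats.length : Int) ∧
        0 ≤ (c : Int) + d.2 ∧ (c : Int) + d.2 < (W : Int)) := by
    constructor
    · rintro ⟨a, b, c1, c2⟩
      refine ⟨a, b, c1, ?_⟩
      rwa [pvRect_row hrect (show ((r : Int) + d.1).toNat < seats.length by omega)] at c2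
    · rintro ⟨a, b, c1, c2⟩
      refine ⟨a, b, c1, ?_⟩
      rwa [pvRect_row hrect (show ((r : Int) + d.1).toNat < seats.length by omega)]
  -- the value stored by the step is exactly rayBit at (r,c)
  have hks : (if 0 ≤ (r : Int) + d.1 ∧ (r : Int) + d.1 < (seats.length : Int) ∧
        0 ≤ (c : Int) + d.2 ∧ (c : Int) + d.2 < ((seats.getD ((r : Int) + d.1).toNat []).length : Int) then
        if ((seats.getD ((r : Int) + d.1).toNat []).getD ((c : Int) + d.2).toNat "") = "." then
          pvMget st.1 ((r : Int) + d.1).toNat ((c : Int) + d.2).toNat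
        else if ((seats.getD ((r : Int) + d.1).toNat []).getD ((c : Int) + d.2).toNat "") = "#" then 1 else 0
      else 0)
      = rayBit seats (W : Int) d.1 d.2 (r : Int) (c : Int) := by
    by_cases hbox : 0 ≤ (r : Int) + d.1 ∧ (r : Int) + d.1 < (seats.length : Int) ∧
        0 ≤ (c : Int) + d.2 ∧ (c : Int) + d.2 < (W : Int)
    · rw [if_pos (hcond.mpr hbox), hrec, if_pos hbox]
      by_cases hdot : ((seats.getD ((r : Int) + d.1).toNat []).getD ((c : Int) + d.2).toNat "") = "."
      · rw [if_pos hdot, if_pos hdot]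
        have hD := hready hbox hdot
        have hnr : (((r : Int) + d.1).toNat : Int) = (r : Int) + d.1 := Int.toNat_of_nonneg hbox.1
        have hnc : (((c : Int) + d.2).toNat : Int) = (c : Int) + d.2 := Int.toNat_of_nonneg hbox.2.2.1
        have := hSeenD ((r : Int) + d.1).toNat (by omega) ((c : Int) + d.2).toNat (by omega) hD
        rw [this, hnr, hnc]
      · rw [if_neg hdot, if_neg hdot]
    · rw [if_neg (fun hx => hbox (hcond.mp hx)), hrec, if_neg hbox]
  have hcell : pvSweepCell seats d r st c
      = (pvMset st.1 r c (rayBit seats (W : Int) d.1 d.2 (r : Int) (c : Int)),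
         pvMset st.2 r c (pvMget st.2 r c + rayBit seats (W : Int) d.1 d.2 (r : Int) (c : Int))) := by
    simp only [pvSweepCell]
    rw [hks]
  rw [hcell]
  have hb1 : r < st.1.length := by rw [pvShape_len hs1]; exact hr
  have hb1c : c < (st.1.getD r []).length := by rw [pvShape_row hs1, pvRect_row hrect hr]; exact hc
  have hb2 : r < st.2.length := by rw [pvShape_len hs2]; exact hr
  have hb2c : c < (st.2.getD r []).length := by rw [pvShape_row hs2, pvRect_row hrect hr]; exact hc
  refine ⟨pvMset_shape seats st.1 r c _ hs1, pvMset_shape seats st.2 r c _ hs2, ?_, ?_, ?_, ?_⟩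
  · intro r' hr' c' hc' hD'
    by_cases heq : r' = r ∧ c' = c
    · obtain ⟨rfl, rfl⟩ := heq
      exact pvMget_mset_self _ _ _ _ hb1 hb1c
    · have hne : r ≠ r' ∨ c ≠ c' := by
        by_cases hx : r = r'
        · exact Or.inr (fun hy => heq ⟨hx.symm, hy.symm⟩)
        · exact Or.inl hx
      rw [pvMget_mset_ne st.1 r c r' c' _ hne]
      exact hSeenD r' hr' c' hc' (hD'.resolve_right heq)
  · intro r' hr' c' hc' hD'
    push_neg at hD'
    have hne : r ≠ r' ∨ c ≠ c' := by
      rcases hD' with ⟨_, h2⟩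
      by_cases hx : r' = r
      · right; intro hcx; exact h2 hx (by omega)
      · left; omega
    rw [pvMget_mset_ne st.1 r c r' c' _ hne]
    exact hSeen0 r' hr' c' hc' hD'.1
  · intro r' hr' c' hc' hD'
    by_cases heq : r' = r ∧ c' = c
    · obtain ⟨rfl, rfl⟩ := heq
      rw [pvMget_mset_self st.2 _ _ _ hb2 hb2c, hCnt0 _ hr' _ hc' hnD]
    · have hne : r ≠ r' ∨ c ≠ c' := by
        by_cases hx : r = r'
        · exact Or.inr (fun hy => heq ⟨hx.symm, hy.symm⟩)
        · exact Or.inl hx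
      rw [pvMget_mset_ne st.2 r c r' c' _ hne]
      exact hCntD r' hr' c' hc' (hD'.resolve_right heq)
  · intro r' hr' c' hc' hD'
    push_neg at hD'
    have hne : r ≠ r' ∨ c ≠ c' := by
      rcases hD' with ⟨_, h2⟩
      by_cases hx : r' = r
      · right; intro hcx; exact h2 hx (by omega)
      · left; omega
    rw [pvMget_mset_ne st.2 r c r' c' _ hne]
    exact hCnt0 r' hr' c' hc' hD'.1

-- order facts for range / reversed range
theorem pv_range_decomp {n : Nat} {pre : List Nat} {x : Nat} {post : List Nat}
    (h : List.range n = pre ++ x :: post) : pre = List.range x := by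
  have hlen : pre.length < n := by
    have := congrArg List.length h
    simp at this; omega
  have hx : x = pre.length := by
    have hget := congrArg (fun l => l.getD pre.length 0) h
    simp only at hget
    rw [List.getD_eq_getElem (List.range n) 0 (by simpa using hlen),
      List.getElem_range] at hget
    rw [List.getD_eq_getElem _ 0 (by simp),
      List.getElem_append_right (Nat.le_refl _)] at hget
    simpa using hget.symm
  have hpre : pre = (List.range n).take pre.length := by
    rw [h, List.take_left]
  rw [hpre, List.take_range, hx]
  congr 1
  omega

theorem pv_rev_range_decomp {n : Nat} {pre : List Nat} {x : Nat} {post : List Nat}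
    (h : (List.range n).reverse = pre ++ x :: post) (hx : x + 1 < n) : x + 1 ∈ pre := by
  have hlen : pre.length < n := by
    have := congrArg List.length h
    simp at this; omega
  have hxval : x = n - 1 - pre.length := by
    have hget := congrArg (fun l => l.getD pre.length 0) h
    simp only at hget
    rw [List.getD_eq_getElem ((List.range n).reverse) 0 (by simpa using hlen),
      List.getElem_reverse, List.getElem_range] at hget
    rw [List.getD_eq_getElem _ 0 (by simp),
      List.getElem_append_right (Nat.le_refl _)] at hget
    simp at hget
    omega
  have hj : 1 ≤ pre.length := by omega
  have hpre : pre = ((List.range n).reverse).take pre.length := by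
    rw [h, List.take_left]
  rw [hpre]
  refine List.mem_iff_getElem.mpr ⟨pre.length - 1, ?_, ?_⟩
  · simp
    omega
  · rw [List.getElem_take, List.getElem_reverse, List.getElem_range]
    simp only [List.length_range]
    omega


theorem pvCols_inv (seats : List (List String)) (W : Nat) (d : Int × Int)
    (hd : pvDirOK d) (hrect : pvRect seats W)
    (base : Nat → Nat → Int) (r : Nat) (hr : r < seats.length) :
    ∀ (cols : List Nat) (D : Nat → Nat → Prop),
    (∀ c ∈ cols, c < W) → cols.Nodup → (∀ c ∈ cols, ¬ D r c) →
    (∀ (pre : List Nat) (x : Nat) (post : List Nat), cols = pre ++ x :: post →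
      ∀ (hin : 0 ≤ (r : Int) + d.1 ∧ (r : Int) + d.1 < (seats.length : Int) ∧
          0 ≤ (x : Int) + d.2 ∧ (x : Int) + d.2 < (W : Int)),
        ((seats.getD ((r : Int) + d.1).toNat []).getD ((x : Int) + d.2).toNat "") = "." →
        D ((r : Int) + d.1).toNat ((x : Int) + d.2).toNat ∨
          (((r : Int) + d.1).toNat = r ∧ ((x : Int) + d.2).toNat ∈ pre)) →
    ∀ (st : List (List Int) × List (List Int)), pvInv seats W d base D st →
    pvInv seats W d base (fun a b => D a b ∨ (a = r ∧ b ∈ cols))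
      (cols.foldl (pvSweepCell seats d r) st) := by
  intro cols
  induction cols with
  | nil =>
    intro D _ _ _ _ st h
    exact pvInv_congr seats W d base D _ (by simp) st h
  | cons x rest ih =>
    intro D hcw hnd hnotD hready st h
    simp only [List.foldl_cons]
    have hx : x < W := hcw x (by simp)
    have hstep := pvStep_inv seats W d hd hrect base D r x hr hx (hnotD x (by simp))
      (fun hin hdot => by
        rcases hready [] x rest rfl hin hdot with hD | ⟨-, hm⟩
        · exact hD
        · exact absurd hm (List.not_mem_nil)) st h
    have hrec := ih (fun a b => D a b ∨ (a = r ∧ b = x))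
      (fun c hc => hcw c (by simp [hc]))
      (List.nodup_cons.mp hnd).2
      (fun c hc => by
        rintro (hD | ⟨-, rfl⟩)
        · exact hnotD c (by simp [hc]) hD
        · exact (List.nodup_cons.mp hnd).1 hc)
      (fun pre y post hdec hin hdot => by
        rcases hready (x :: pre) y post (by simp [hdec]) hin hdot with hD | ⟨he, hm⟩
        · exact Or.inl (Or.inl hD)
        · rcases List.mem_cons.mp hm with heq | hm2
          · exact Or.inl (Or.inr ⟨he, heq⟩)
          · exact Or.inr ⟨he, hm2⟩)
      _ hstep
    refine pvInv_congr seats W d base _ _ (fun a b _ _ => ?_) _ hrec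
    constructor
    · rintro ((hD | ⟨h1, h2⟩) | ⟨h1, h2⟩)
      · exact Or.inl hD
      · exact Or.inr ⟨h1, by simp [h2]⟩
      · exact Or.inr ⟨h1, List.mem_cons_of_mem _ h2⟩
    · rintro (hD | ⟨h1, h2⟩)
      · exact Or.inl (Or.inl hD)
      · rcases List.mem_cons.mp h2 with heq | h3
        · exact Or.inl (Or.inr ⟨h1, heq⟩)
        · exact Or.inr ⟨h1, h3⟩

theorem pv_mem_cols {W : Nat} {d2 : Int} {b : Nat} :
    b ∈ (if d2 = 1 then (List.range W).reverse else List.range W) ↔ b < W := by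
  split_ifs <;> simp

theorem pvRows_inv (seats : List (List String)) (W : Nat) (d : Int × Int)
    (hd : pvDirOK d) (hrect : pvRect seats W) (base : Nat → Nat → Int) :
    ∀ (rows : List Nat) (doneRows : List Nat),
    (∀ r ∈ rows, r < seats.length) → rows.Nodup → (∀ r ∈ rows, r ∉ doneRows) →
    (∀ (pre : List Nat) (x : Nat) (post : List Nat), rows = pre ++ x :: post → d.1 ≠ 0 →
      0 ≤ (x : Int) + d.1 → (x : Int) + d.1 < (seats.length : Int) →
      ((x : Int) + d.1).toNat ∈ doneRows ++ pre) →
    ∀ (st : List (List Int) × List (List Int)),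
    pvInv seats W d base (fun a b => a ∈ doneRows ∧ b < W) st →
    pvInv seats W d base (fun a b => a ∈ doneRows ++ rows ∧ b < W)
      (rows.foldl (pvSweepRow seats d) st) := by
  intro rows
  induction rows with
  | nil =>
    intro doneRows _ _ _ _ st h
    exact pvInv_congr seats W d base _ _ (by simp) st h
  | cons x rest ih =>
    intro doneRows hrow hnd hdisj hready st h
    simp only [List.foldl_cons]
    have hx : x < seats.length := hrow x (by simp)
    -- the row's column list, rewritten to width W
    have hwx : (seats.getD x []).length = W := pvRect_row hrect hx
    have hrowfold : pvSweepRow seats d st x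
        = (if d.2 = 1 then (List.range W).reverse else List.range W).foldl
            (pvSweepCell seats d x) st := by
      simp only [pvSweepRow, hwx]
    have hcols := pvCols_inv seats W d hd hrect base x hx
      (if d.2 = 1 then (List.range W).reverse else List.range W)
      (fun a b => a ∈ doneRows ∧ b < W)
      (fun c hc => pv_mem_cols.mp hc)
      (by split_ifs <;> simp [List.nodup_range])
      (fun c _ hD => hdisj x (by simp) hD.1)
      (fun pre y post hdec hin hdot => by
        by_cases hd1 : d.1 = 0
        · -- neighbour in the same row: it lies earlier in the column order
          right
          constructor
          · rw [hd1]; simp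
          · rcases hd with h1 | h1 | ⟨-, h2⟩
            · exact absurd h1 (by rw [hd1]; norm_num)
            · exact absurd h1 (by rw [hd1]; norm_num)
            · rcases h2 with h2 | h2
              · -- d.2 = 1 : columns are processed in decreasing order
                rw [h2] at hin hdec ⊢
                have hcols1 : (List.range W).reverse = pre ++ y :: post := by
                  simpa [h2] using hdec
                have hy1 : y + 1 < W := by
                  have := hin.2.2.2; omega
                have : ((y : Int) + 1).toNat = y + 1 := by omega
                rw [this]
                exact pv_rev_range_decomp hcols1 hy1
              · -- d.2 = -1 : columns are processed in increasing order
                rw [h2] at hin hdec ⊢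
                have hcols1 : List.range W = pre ++ y :: post := by
                  simpa [h2] using hdec
                have hy1 : 1 ≤ y := by
                  have := hin.2.2.1; omega
                have hyt : ((y : Int) + (-1)).toNat = y - 1 := by omega
                rw [hyt, pv_range_decomp hcols1]
                simp
                omega
        · -- neighbour in a previously processed row
          left
          refine ⟨?_, by have := hin.2.2.1; have := hin.2.2.2; omega⟩
          have := hready [] x rest rfl hd1 hin.1 hin.2.1
          simpa using this)
      st h
    rw [hrowfold]
    have hconv := pvInv_congr seats W d base _
      (fun a b => a ∈ doneRows ++ [x] ∧ b < W)
      (fun a b _ hb => by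
        constructor
        · rintro (⟨h1, h2⟩ | ⟨h1, h2⟩)
          · exact ⟨by simp [h1], h2⟩
          · exact ⟨by simp [h1], hb⟩
        · rintro ⟨h1, h2⟩
          rcases List.mem_append.mp h1 with h3 | h3
          · exact Or.inl ⟨h3, h2⟩
          · exact Or.inr ⟨by simpa using h3, pv_mem_cols.mpr hb⟩)
      _ hcols
    have hrec := ih (doneRows ++ [x])
      (fun r hrm => hrow r (by simp [hrm]))
      (List.nodup_cons.mp hnd).2
      (fun r hrm => by
        intro hmem
        rcases List.mem_append.mp hmem with h3 | h3
        · exact hdisj r (by simp [hrm]) h3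
        · exact (List.nodup_cons.mp hnd).1 (by rwa [List.mem_singleton.mp h3] at hrm))
      (fun pre y post hdec hd1 h1 h2 => by
        have := hready (x :: pre) y post (by simp [hdec]) hd1 h1 h2
        simp only [List.append_assoc, List.singleton_append]
        simpa using this)
      _ hconv
    refine pvInv_congr seats W d base _ _ (fun a b _ _ => ?_) _ hrec
    constructor
    · rintro ⟨h1, h2⟩
      refine ⟨?_, h2⟩
      rcases List.mem_append.mp h1 with h3 | h3
      · rcases List.mem_append.mp h3 with h4 | h4
        · simp [h4]
        · simp [by simpa using h4]
      · simp [List.mem_cons_of_mem _ h3]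
    · rintro ⟨h1, h2⟩
      refine ⟨?_, h2⟩
      rcases List.mem_append.mp h1 with h3 | h3
      · simp [h3]
      · rcases List.mem_cons.mp h3 with h4 | h4
        · simp [h4]
        · simp [h4]
theorem pvDirs_OK : ∀ d ∈ pvDirs, pvDirOK d := by
  intro d hd
  fin_cases hd <;> simp [pvDirOK]

theorem pv_mem_rows {H : Nat} {d1 : Int} {b : Nat} :
    b ∈ (if d1 = 1 then (List.range H).reverse else List.range H) ↔ b < H := by
  split_ifs <;> simp

theorem pv_seen0_get (seats : List (List String)) (r c : Nat) :
    pvMget (seats.map (fun row => List.replicate row.length (0 : Int))) r c = 0 := by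
  unfold pvMget
  by_cases hr : r < seats.length
  · rw [List.getD_eq_getElem _ [] (by simpa using hr), List.getElem_map]
    by_cases hc : c < seats[r].length
    · rw [List.getD_eq_getElem _ 0 (by simpa using hc)]
      simp
    · rw [List.getD_eq_default _ 0 (by simpa using hc)]
  · rw [List.getD_eq_default _ [] (by simpa using hr)]
    simp

theorem pv_seen0_shape (seats : List (List String)) :
    pvShape seats (seats.map (fun row => List.replicate row.length (0 : Int))) := by
  simp [pvShape, List.map_map, Function.comp_def]

theorem pvDir_pass (seats : List (List String)) (W : Nat) (d : Int × Int)
    (hd : d ∈ pvDirs) (hrect : pvRect seats W)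
    (counts : List (List Int)) (hc : pvShape seats counts) :
    pvShape seats (pvSweepDir seats counts d) ∧
    ∀ r < seats.length, ∀ c < W,
      pvMget (pvSweepDir seats counts d) r c
        = pvMget counts r c + rayBit seats (W : Int) d.1 d.2 (r : Int) (c : Int) := by
  have hdOK : pvDirOK d := pvDirs_OK d hd
  have hrows := pvRows_inv seats W d hdOK hrect (fun a b => pvMget counts a b)
    (if d.1 = 1 then (List.range seats.length).reverse else List.range seats.length) []
    (fun r hr => pv_mem_rows.mp hr)
    (by split_ifs <;> simp [List.nodup_range])
    (fun r _ => List.not_mem_nil)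
    (fun pre x post hdec hd1 h1 h2 => by
      rcases hdOK with hd11 | hd11 | ⟨hd11, -⟩
      · -- d.1 = 1 : rows processed top-down from the bottom
        rw [hd11] at hdec
        have hx1 : x + 1 < seats.length := by omega
        have hxt : ((x : Int) + d.1).toNat = x + 1 := by omega
        rw [hxt]
        simpa using pv_rev_range_decomp hdec hx1
      · -- d.1 = -1 : rows processed top to bottom
        rw [hd11] at hdec h1 ⊢
        have hxt : ((x : Int) + (-1)).toNat = x - 1 := by omega
        rw [hxt, pv_range_decomp hdec]
        simp
        omega
      · exact absurd hd11 hd1)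
    (seats.map (fun row => List.replicate row.length (0 : Int)), counts)
    ⟨pv_seen0_shape seats, hc,
      fun r _ c _ hD => absurd hD.1 (List.not_mem_nil),
      fun r _ c _ _ => pv_seen0_get seats r c,
      fun r _ c _ hD => absurd hD.1 (List.not_mem_nil),
      fun _ _ _ _ _ => rfl⟩
  obtain ⟨-, hsh2, -, -, hval, -⟩ := hrows
  refine ⟨hsh2, fun r hr c hcw => ?_⟩
  exact hval r hr c hcw ⟨by simpa using pv_mem_rows.mpr hr, hcw⟩

theorem pvDirs_fold (seats : List (List String)) (W : Nat) (hrect : pvRect seats W) :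
    ∀ (ds : List (Int × Int)), (∀ d ∈ ds, d ∈ pvDirs) →
    ∀ (counts : List (List Int)), pvShape seats counts →
    pvShape seats (ds.foldl (pvSweepDir seats) counts) ∧
    ∀ r < seats.length, ∀ c < W,
      pvMget (ds.foldl (pvSweepDir seats) counts) r c
        = pvMget counts r c
          + (ds.map (fun d => rayBit seats (W : Int) d.1 d.2 (r : Int) (c : Int))).sum := by
  intro ds
  induction ds with
  | nil => intro _ counts hc; exact ⟨hc, by simp⟩
  | cons dd rest ih =>
    intro hds counts hc
    simp only [List.foldl_cons]
    obtain ⟨hsh, hval⟩ := pvDir_pass seats W dd (hds dd (by simp)) hrect counts hc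
    obtain ⟨hsh2, hval2⟩ := ih (fun d hdm => hds d (by simp [hdm])) (pvSweepDir seats counts dd) hsh
    refine ⟨hsh2, fun r hr c hcw => ?_⟩
    rw [hval2 r hr c hcw, hval r hr c hcw]
    simp only [List.map_cons, List.sum_cons]
    ring

theorem pvCounts_final (seats : List (List String)) (W : Nat) (hrect : pvRect seats W) :
    pvShape seats (pvDirs.foldl (pvSweepDir seats)
      (seats.map (fun row => List.replicate row.length (0 : Int)))) ∧
    ∀ r < seats.length, ∀ c < W,
      pvMget (pvDirs.foldl (pvSweepDir seats)
          (seats.map (fun row => List.replicate row.length (0 : Int)))) r c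
        = check_seats seats (r : Int) (c : Int) (W : Int) := by
  obtain ⟨hsh, hval⟩ := pvDirs_fold seats W hrect pvDirs (fun _ h => h)
    (seats.map (fun row => List.replicate row.length (0 : Int))) (pv_seen0_shape seats)
  refine ⟨hsh, fun r hr c hcw => ?_⟩
  rw [hval r hr c hcw, pv_seen0_get seats r c, check_eq_sum]
  ring

theorem pvCell_shape (seats : List (List String)) (d : Int × Int) (r c : Nat)
    (st : List (List Int) × List (List Int))
    (h1 : pvShape seats st.1) (h2 : pvShape seats st.2) :
    pvShape seats (pvSweepCell seats d r st c).1 ∧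
    pvShape seats (pvSweepCell seats d r st c).2 := by
  unfold pvSweepCell
  exact ⟨pvMset_shape seats st.1 r c _ h1, pvMset_shape seats st.2 r c _ h2⟩

theorem pvColsFold_shape (seats : List (List String)) (d : Int × Int) (r : Nat)
    (cols : List Nat) :
    ∀ (st : List (List Int) × List (List Int)),
    pvShape seats st.1 → pvShape seats st.2 →
    pvShape seats (cols.foldl (pvSweepCell seats d r) st).1 ∧
    pvShape seats (cols.foldl (pvSweepCell seats d r) st).2 := by
  induction cols with
  | nil => intro st h1 h2; exact ⟨h1, h2⟩
  | cons c crest ih =>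
    intro st h1 h2
    simp only [List.foldl_cons]
    obtain ⟨g1, g2⟩ := pvCell_shape seats d r c st h1 h2
    exact ih _ g1 g2

theorem pvRowsFold_shape (seats : List (List String)) (d : Int × Int)
    (rows : List Nat) :
    ∀ (st : List (List Int) × List (List Int)),
    pvShape seats st.1 → pvShape seats st.2 →
    pvShape seats (rows.foldl (pvSweepRow seats d) st).1 ∧
    pvShape seats (rows.foldl (pvSweepRow seats d) st).2 := by
  induction rows with
  | nil => intro st h1 h2; exact ⟨h1, h2⟩
  | cons r rrest ih =>
    intro st h1 h2
    simp only [List.foldl_cons]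
    obtain ⟨g1, g2⟩ := pvColsFold_shape seats d r _ st h1 h2
    exact ih _ g1 g2

theorem pvSweep_shape (seats : List (List String)) (ds : List (Int × Int))
    (counts : List (List Int)) (h : pvShape seats counts) :
    pvShape seats (ds.foldl (pvSweepDir seats) counts) := by
  induction ds generalizing counts with
  | nil => exact h
  | cons dd rest ih =>
    simp only [List.foldl_cons]
    refine ih _ ?_
    unfold pvSweepDir
    exact (pvRowsFold_shape seats dd _ _ (pv_seen0_shape seats) h).2

theorem pv_B_rect (seats : List (List String)) (W : Nat) (hrect : pvRect seats W)
    (hW : W = (seats.headD []).length) :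
    model_seats_alt seats
      = ((List.range seats.length).map (pvRowOut seats),
         ((List.range seats.length).map (pvCnt seats)).sum) := by
  obtain ⟨hsh, hval⟩ := pvCounts_final seats W hrect
  simp only [model_seats_alt]
  rw [show ([((-1 : Int), (-1 : Int)), (-1, 0), (-1, 1), (0, -1), (0, 1), (1, -1), (1, 0), (1, 1)]
      : List (Int × Int)) = pvDirs from rfl]
  have hlen : (pvDirs.foldl (pvSweepDir seats)
      (seats.map (fun row => List.replicate row.length (0 : Int)))).length = seats.length :=
    pvShape_len hsh
  have hns : (seats.zip (pvDirs.foldl (pvSweepDir seats)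
        (seats.map (fun row => List.replicate row.length (0 : Int))))).map (fun rc =>
      (rc.1.zip rc.2).map (fun sn =>
        if sn.1 = "L" ∧ sn.2 = 0 then "#"
        else if sn.1 = "#" ∧ 5 ≤ sn.2 then "L"
        else sn.1))
      = (List.range seats.length).map (pvRowOut seats) := by
    apply List.ext_getElem
    · simp [hlen]
    · intro r h1 h2
      have hr : r < seats.length := by simpa using h2
      simp only [List.getElem_map, List.getElem_zip, List.getElem_range]
      have hCFr : (pvDirs.foldl (pvSweepDir seats)
          (seats.map (fun row => List.replicate row.length (0 : Int))))[r].length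
          = seats[r].length := by
        have := pvShape_row hsh r
        rwa [List.getD_eq_getElem _ [] (by omega), List.getD_eq_getElem seats [] hr] at this
      have hrw : seats[r].length = W := hrect seats[r] (List.getElem_mem hr)
      have hro : pvRowOut seats r
          = (List.range seats[r].length).map (fun c => pvStepCell seats r seats[r] c) := by
        simp only [pvRowOut]
        rw [List.getD_eq_getElem seats [] hr]
      rw [hro]
      apply List.ext_getElem
      · simp [hCFr]
      · intro c g1 g2
        have hc : c < seats[r].length := by simpa using g2
        simp only [List.getElem_map, List.getElem_zip, List.getElem_range]
        have hmg : (pvDirs.foldl (pvSweepDir seats)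
            (seats.map (fun row => List.replicate row.length (0 : Int))))[r][c]
            = pvMget (pvDirs.foldl (pvSweepDir seats)
                (seats.map (fun row => List.replicate row.length (0 : Int)))) r c := by
          unfold pvMget
          rw [List.getD_eq_getElem _ [] (by omega), List.getD_eq_getElem _ 0 (by omega)]
        rw [hmg, hval r hr c (by omega)]
        simp only [pvStepCell, pvRule]
        rw [List.getD_eq_getElem seats[r] "" hc, hrw]
  rw [hns]
  simp only [Prod.mk.injEq, List.map_map, true_and]
  rfl

theorem pv_rowout_nofree (seats : List (List String))
    (h : ∀ row ∈ seats, ∀ s ∈ row, s ≠ "L" ∧ s ≠ "#")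
    (r : Nat) (hr : r < seats.length) : pvRowOut seats r = seats[r] := by
  have hro : pvRowOut seats r
      = (List.range seats[r].length).map (fun c => pvStepCell seats r seats[r] c) := by
    simp only [pvRowOut]
    rw [List.getD_eq_getElem seats [] hr]
  rw [hro]
  apply List.ext_getElem
  · simp
  · intro c h1 h2
    have hc : c < seats[r].length := by simpa using h1
    simp only [List.getElem_map, List.getElem_range]
    simp only [pvStepCell, pvRule]
    rw [List.getD_eq_getElem seats[r] "" hc]
    have hs := h seats[r] (List.getElem_mem hr) (seats[r][c]) (List.getElem_mem hc)
    simp [hs.1, hs.2]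

theorem pv_A_nofree (seats : List (List String))
    (h : ∀ row ∈ seats, ∀ s ∈ row, s ≠ "L" ∧ s ≠ "#") :
    model_seats seats = (seats, 0) := by
  rw [pv_A_eq]
  have h1 : (List.range seats.length).map (pvRowOut seats) = seats := by
    apply List.ext_getElem
    · simp
    · intro r g1 g2
      simp only [List.getElem_map, List.getElem_range]
      exact pv_rowout_nofree seats h r (by simpa using g2)
  have h2 : ((List.range seats.length).map (pvCnt seats)).sum = 0 := by
    apply List.sum_eq_zero
    intro x hx
    obtain ⟨r, hrm, rfl⟩ := List.mem_map.mp hx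
    have hr : r < seats.length := by simpa using hrm
    unfold pvCnt
    rw [pv_rowout_nofree seats h r hr]
    have : seats[r].count "#" = 0 := List.count_eq_zero.mpr
      (fun hmem => (h seats[r] (List.getElem_mem hr) "#" hmem).2 rfl)
    simp [this]
  rw [h1, h2]

theorem pv_B_nofree (seats : List (List String))
    (h : ∀ row ∈ seats, ∀ s ∈ row, s ≠ "L" ∧ s ≠ "#") :
    model_seats_alt seats = (seats, 0) := by
  simp only [model_seats_alt]
  rw [show ([((-1 : Int), (-1 : Int)), (-1, 0), (-1, 1), (0, -1), (0, 1), (1, -1), (1, 0), (1, 1)]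
      : List (Int × Int)) = pvDirs from rfl]
  have hsh := pvSweep_shape seats pvDirs _ (pv_seen0_shape seats)
  have hlen : (pvDirs.foldl (pvSweepDir seats)
      (seats.map (fun row => List.replicate row.length (0 : Int)))).length = seats.length :=
    pvShape_len hsh
  have hns : (seats.zip (pvDirs.foldl (pvSweepDir seats)
        (seats.map (fun row => List.replicate row.length (0 : Int))))).map (fun rc =>
      (rc.1.zip rc.2).map (fun sn =>
        if sn.1 = "L" ∧ sn.2 = 0 then "#"
        else if sn.1 = "#" ∧ 5 ≤ sn.2 then "L"
        else sn.1))
      = seats := by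
    apply List.ext_getElem
    · simp [hlen]
    · intro r h1 h2
      have hr : r < seats.length := by simpa using h2
      simp only [List.getElem_map, List.getElem_zip]
      have hCFr : (pvDirs.foldl (pvSweepDir seats)
          (seats.map (fun row => List.replicate row.length (0 : Int))))[r].length
          = seats[r].length := by
        have := pvShape_row hsh r
        rwa [List.getD_eq_getElem _ [] (by omega), List.getD_eq_getElem seats [] hr] at this
      apply List.ext_getElem
      · simp [hCFr]
      · intro c g1 g2
        have hc : c < seats[r].length := by simpa using g2
        simp only [List.getElem_map, List.getElem_zip]
        have hs := h seats[r] (List.getElem_mem hr) (seats[r][c]) (List.getElem_mem hc)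
        simp [hs.1, hs.2]
  rw [hns]
  simp only [Prod.mk.injEq, true_and]
  apply List.sum_eq_zero
  intro x hx
  obtain ⟨row, hrm, rfl⟩ := List.mem_map.mp hx
  have : row.count "#" = 0 := List.count_eq_zero.mpr
    (fun hmem => (h row hrm "#" hmem).2 rfl)
  simp [this]

theorem model_seats_eq (seats : List (List String)) (hpre : Pre_model_seats seats) :
    model_seats seats = model_seats_alt seats := by
  cases hpre with
  | inl hrect =>
    rw [pv_A_eq, pv_B_rect seats (seats.headD []).length (fun row hrow => hrect row hrow) rfl]
  | inr hfree =>
    rw [pv_A_nofree seats hfree, pv_B_nofree seats hfree]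

-- ===== VERDICT (by name: the statement is the Claim_ definition above) =====
theorem model_seats_spec : Claim_equal_model_seats := by
  intro seats _ hpre
  unfold Spec_model_seats
  exact model_seats_eq seats hpre
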